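-- pv_equiv track=rewrite | github.com/Felix-LeeSM/Algorithm_study | 문제 풀이/050722 카카오.py | solution
-- ===== SOURCE A (Python) =====
-- import collections
--
-- def solution(rc, oper):
--     i, j = len(rc), len(rc[0])
--     q = collections.deque()
--     for line in rc:
--         q.append(collections.deque(line))
--
--     def ro(n):
--         n %= i*j
--         for _ in range(n):
--             for idx in range(1, i):
--                 q[idx-1].appendleft(q[idx].popleft())
--             for idx in range(i-1, 0, -1):
--                 q[idx].append(q[idx-1].pop())
--
--     def sh(n):
--         q.rotate(n)
--
--     temp = oper[0]
--     cnt = 1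
--     for o in oper[1:]:
--         if temp == o:
--             cnt += 1
--         else:
--             if temp[0] == 'R':
--                 ro(cnt)
--             else:
--                 sh(cnt)
--     else:
--         if temp[0] == 'R':
--             ro(cnt)
--         else:
--             sh(cnt)
--     return [list(i) for i in q]
-- ===== SOURCE B (Python) =====
-- def border_step(m):
--     # one clockwise rotation step of the outer border
--     n = len(m)
--     if n < 2:
--         return [list(r) for r in m]
--     a = ([[m[1][0]] + list(m[0])]
--          + [[nxt[0]] + cur[1:] for cur, nxt in zip(m[1:-1], m[2:])]
--          + [m[n - 1][1:]])
--     return ([a[0][:-1]]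
--             + [cur[:-1] + [prv[-1]] for prv, cur in zip(a[:-1], a[1:-1])]
--             + [a[n - 1] + [a[n - 2][-1]]])
--
--
-- def border_power(m, k):
--     # the step is a fixed permutation of positions: square the source map, gather once
--     src = [[(r, c) for c in range(len(row))] for r, row in enumerate(m)]
--     sq = border_step(src)
--     while k:
--         if k & 1:
--             src = [[src[r][c] for (r, c) in row] for row in sq]
--         sq = [[sq[r][c] for (r, c) in row] for row in sq]
--         k >>= 1
--     return [[m[r][c] for (r, c) in row] for row in src]
--
--
-- def solution(rc, oper):
--     rows, cols = len(rc), len(rc[0])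
--     grid = [list(r) for r in rc]
--
--     def rotate_border(g, n):
--         return border_power(g, n % (rows * cols))
--
--     def shift_rows(g, n):
--         t = n % rows
--         return g[rows - t:] + g[:rows - t]
--
--     op, cnt = oper[0], 1
--     for o in oper[1:]:
--         if o == op:
--             cnt += 1
--         else:
--             grid = rotate_border(grid, cnt) if op[0] == 'R' else shift_rows(grid, cnt)
--     return rotate_border(grid, cnt) if op[0] == 'R' else shift_rows(grid, cnt)
-- ===== Notes on version B (the rewrite author's own statement) =====
-- stated objective: alternative
-- what changed: A applies each border rotation by repeating cnt in-place deque shuffles over all rows and shifts rows by rotating a deque; B applies a border rotation as the cnt-th power (repeated squaring) of the one-step position permutation gathered in a single pass, and shifts rows by slicing; Pre_ excludes inputs where A raises (empty matrix / empty oper / empty first op string, and matrices with an empty row under a leading Rotate, where B's one-step permutation also raises).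
-- outside the precondition, e.g. on solution([[1], []], ['R', 'R']): A returns [[1], []], B raises IndexError
import Mathlib
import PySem

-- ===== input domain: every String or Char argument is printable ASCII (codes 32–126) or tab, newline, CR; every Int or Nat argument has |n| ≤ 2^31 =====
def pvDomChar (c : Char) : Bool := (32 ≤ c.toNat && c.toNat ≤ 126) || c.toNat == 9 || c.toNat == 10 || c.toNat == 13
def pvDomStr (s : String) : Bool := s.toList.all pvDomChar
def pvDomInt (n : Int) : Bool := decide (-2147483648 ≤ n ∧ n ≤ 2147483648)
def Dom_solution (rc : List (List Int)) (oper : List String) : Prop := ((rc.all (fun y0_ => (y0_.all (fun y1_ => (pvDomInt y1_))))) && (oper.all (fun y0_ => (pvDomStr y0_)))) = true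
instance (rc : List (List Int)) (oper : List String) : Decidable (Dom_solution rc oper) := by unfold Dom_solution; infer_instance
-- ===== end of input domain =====

-- B keeps the run-counting driver but replaces each applied operation: the border
-- rotation is computed as the k-th power (repeated squaring) of the one-step position
-- permutation instead of k in-place deque shuffles, and the row shift is a slice rotation.

-- ===== PORT A =====
-- A keeps the matrix as a deque of row-deques (popleft/appendleft = head/cons,
-- pop/append = getLast/++[x]).  Its two inner index loops walk adjacent rows; they are
-- ported as the obvious structural recursion over the row list carrying the same state
-- (the row already popped from).  Python raises IndexError on an empty row; the `headD 0`
-- / `getLastD 0` defaults are only reached outside Pre_solution.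
def pvA_loop1Aux (cur : List Int) : List (List Int) → List (List Int)
  | [] => [cur]
  | s :: rest => (s.headD 0 :: cur) :: pvA_loop1Aux s.tail rest

-- for idx in range(1, i): q[idx-1].appendleft(q[idx].popleft())
def pvA_loop1 : List (List Int) → List (List Int)
  | [] => []
  | r :: rest => pvA_loop1Aux r rest

-- for idx in range(i-1, 0, -1): q[idx].append(q[idx-1].pop())   (each row's popped
-- element is its own last element, independent of the iteration order)
def pvA_loop2Aux (c : Int) : List (List Int) → List (List Int)
  | [] => []
  | [s] => [s ++ [c]]
  | s :: t :: rest => (s.dropLast ++ [c]) :: pvA_loop2Aux (s.getLastD 0) (t :: rest)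

-- one iteration of the `for _ in range(n)` body of ro
def pvA_step (m : List (List Int)) : List (List Int) :=
  match pvA_loop1 m with
  | [] => []
  | [r] => [r]
  | r :: rest => r.dropLast :: pvA_loop2Aux (r.getLastD 0) rest

-- def ro(n): n %= i*j; for _ in range(n): …   (i*j = 0 raises ZeroDivisionError: outside Pre_)
def pvA_ro (i j : Int) (n : Int) (q : List (List Int)) : List (List Int) :=
  if i * j ≤ 0 then q
  else pvA_step^[(PySem.Int.mod n (i * j)).toNat] q

-- def sh(n): q.rotate(n)   (deque.rotate = rotate right by n mod len; no-op on the empty deque)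
def pvA_sh (n : Int) (q : List (List Int)) : List (List Int) :=
  if q.length = 0 then q
  else
    let t := (PySem.Int.mod n (q.length : Int)).toNat
    q.drop (q.length - t) ++ q.take (q.length - t)

def pvA_apply (i j : Int) (temp : String) (cnt : Int) (q : List (List Int)) : List (List Int) :=
  if PySem.Str.pyGet? temp 0 = some 'R' then pvA_ro i j cnt q else pvA_sh cnt q

def solution (rc : List (List Int)) (oper : List String) : List (List Int) :=
  let i : Int := rc.length
  let j : Int := (rc.headD []).length       -- len(rc[0]); rc = [] raises: outside Pre_
  let temp := oper.headD ""                 -- oper[0]; oper = [] raises: outside Pre_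
  -- for o in oper[1:]: if temp == o: cnt += 1 else: apply the op
  let st := oper.tail.foldl
    (fun (st : Int × List (List Int)) o =>
      if temp == o then (st.1 + 1, st.2) else (st.1, pvA_apply i j temp st.1 st.2))
    (1, rc)
  -- the for…else branch: the op is applied once more at the end
  pvA_apply i j temp st.1 st.2

-- ===== PORT B =====
-- Source B: border_step written with slices and two zips of adjacent rows (a pure function,
-- used on the coordinate grid); positions are (row, col) pairs of Python ints.
def pvB_d : Int × Int := (0, 0)

def pvB_step (m : List (List (Int × Int))) : List (List (Int × Int)) :=
  if m.length < 2 then m.map (fun r => r)  -- [list(r) for r in m]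
  else
    let a :=
      [PySem.List.pyGetD (PySem.List.pyGetD m 1 []) 0 pvB_d :: PySem.List.pyGetD m 0 []]
      ++ List.zipWith (fun cur nxt => PySem.List.pyGetD nxt 0 pvB_d :: cur.tail)
           (PySem.List.slice m (some 1) (some (-1))) (PySem.List.slice m (some 2) none)
      ++ [(PySem.List.pyGetD m ((m.length : Int) - 1) []).tail]
    [(PySem.List.pyGetD a 0 []).dropLast]
    ++ List.zipWith (fun prv cur => cur.dropLast ++ [PySem.List.pyGetD prv (-1) pvB_d])
         (PySem.List.slice a none (some (-1))) (PySem.List.slice a (some 1) (some (-1)))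
    ++ [PySem.List.pyGetD a ((m.length : Int) - 1) []
        ++ [PySem.List.pyGetD (PySem.List.pyGetD a ((m.length : Int) - 2) []) (-1) pvB_d]]

-- [[src[r][c] for (r, c) in row] for row in sq]
def pvB_gatherP (x : List (List (Int × Int))) (s : List (List (Int × Int))) :
    List (List (Int × Int)) :=
  s.map (fun row => row.map (fun p => PySem.List.pyGetD (PySem.List.pyGetD x p.1 []) p.2 pvB_d))

-- [[m[r][c] for (r, c) in row] for row in src]
def pvB_gatherI (g : List (List Int)) (s : List (List (Int × Int))) : List (List Int) :=
  s.map (fun row => row.map (fun p => PySem.List.pyGetD (PySem.List.pyGetD g p.1 []) p.2 0))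

-- while k: if k & 1: src = gather(src, sq); sq = gather(sq, sq); k >>= 1
-- (fuel-guarded so it reduces structurally; fuel = k always suffices since k halves)
def pvB_binpowAux : Nat → List (List (Int × Int)) → List (List (Int × Int)) → Nat →
    List (List (Int × Int))
  | 0, src, _, _ => src
  | fuel + 1, src, sq, k =>
    if k = 0 then src
    else pvB_binpowAux fuel (if k % 2 = 1 then pvB_gatherP src sq else src)
           (pvB_gatherP sq sq) (k / 2)

def pvB_binpow (src sq : List (List (Int × Int))) (k : Nat) : List (List (Int × Int)) :=
  pvB_binpowAux k src sq k

def pvB_borderPower (m : List (List Int)) (k : Int) : List (List Int) :=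
  let src := (PySem.List.enumerate m 0).map
    (fun rr => (PySem.List.pyRange 0 (rr.2.length : Int) 1).map (fun c => (rr.1, c)))
  let sq := pvB_step src
  pvB_gatherI m (pvB_binpow src sq k.toNat)

-- rotate_border / shift_rows dispatched on op[0] == 'R', as in Source B's loop body
def pvB_apply (rows cols : Int) (op : String) (cnt : Int) (g : List (List Int)) :
    List (List Int) :=
  if PySem.Str.pyGet? op 0 = some 'R' then
    pvB_borderPower g (PySem.Int.mod cnt (rows * cols))
  else
    let t := PySem.Int.mod cnt rows
    PySem.List.slice g (some (rows - t)) none ++ PySem.List.slice g none (some (rows - t))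

def solution_alt (rc : List (List Int)) (oper : List String) : List (List Int) :=
  let rows : Int := rc.length
  let cols : Int := (rc.headD []).length
  let op := oper.headD ""
  let st := oper.tail.foldl
    (fun (st : Int × List (List Int)) o =>
      if o == op then (st.1 + 1, st.2) else (st.1, pvB_apply rows cols op st.1 st.2))
    (1, rc)
  pvB_apply rows cols op st.1 st.2

-- ===== PRECONDITION & SPEC =====
-- Pre_ excludes the inputs where A raises: empty rc / empty oper / empty oper[0]
-- (IndexError), and — when the first operation is a Rotate — matrices with an empty row
-- (i*j = 0 raises ZeroDivisionError, an empty row makes popleft raise IndexError unless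
-- every applied count happens to be ≡ 0 mod i*j, where B's eager one-step permutation
-- still raises IndexError).
def Pre_solution (rc : List (List Int)) (oper : List String) : Prop :=
  rc ≠ [] ∧ oper ≠ [] ∧ oper.headD "" ≠ "" ∧
  (PySem.Str.pyGet? (oper.headD "") 0 = some 'R' → ∀ r ∈ rc, r ≠ [])
instance (rc : List (List Int)) (oper : List String) : Decidable (Pre_solution rc oper) := by
  unfold Pre_solution; infer_instance

def pvWitness_solution : List (List Int) × List String :=
  ([[1, 2, 3], [4, 5, 6], [7, 8, 9]], ["Rotate", "Rotate", "ShiftRow", "Rotate"])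

def Spec_solution (rc : List (List Int)) (oper : List String) (out : List (List Int)) : Prop :=
  out = solution_alt rc oper
instance (rc : List (List Int)) (oper : List String) (out : List (List Int)) :
    Decidable (Spec_solution rc oper out) := by unfold Spec_solution; infer_instance

-- ===== CLAIM (what is proved, stated in full; the proofs are below) =====
def Claim_equal_solution : Prop := ∀ (rc : List (List Int)) (oper : List String),
  Dom_solution rc oper → Pre_solution rc oper → Spec_solution rc oper (solution rc oper)

-- ===== LEMMAS AND PROOFS =====

-- The canonical one-border-step, generic in the element type (both ports' step
-- functions are instances of it; all equivalence reasoning happens here).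
def gS1 {α : Type} (d : α) (cur : List α) : List (List α) → List (List α)
  | [] => [cur]
  | s :: rest => (s.headD d :: cur) :: gS1 d s.tail rest

def gS2 {α : Type} (d : α) (c : α) : List (List α) → List (List α)
  | [] => []
  | [s] => [s ++ [c]]
  | s :: t :: rest => (s.dropLast ++ [c]) :: gS2 d (s.getLastD d) (t :: rest)

def gStep {α : Type} (d : α) : List (List α) → List (List α)
  | [] => []
  | r :: rest =>
    match gS1 d r rest with
    | [] => []
    | [x] => [x]
    | x :: xs => x.dropLast :: gS2 d (x.getLastD d) xs

theorem pvA_loop1Aux_eq (l : List (List Int)) (cur : List Int) :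
    pvA_loop1Aux cur l = gS1 0 cur l := by
  induction l generalizing cur with
  | nil => rfl
  | cons s rest ih => simp [pvA_loop1Aux, gS1, ih]

theorem pvA_loop2Aux_eq (l : List (List Int)) (c : Int) :
    pvA_loop2Aux c l = gS2 0 c l := by
  induction l generalizing c with
  | nil => rfl
  | cons s rest ih =>
    cases rest with
    | nil => rfl
    | cons t rest' => simp [pvA_loop2Aux, gS2, ih]

theorem pvA_step_eq (m : List (List Int)) : pvA_step m = gStep 0 m := by
  cases m with
  | nil => rfl
  | cons r rest =>
    simp only [pvA_step, pvA_loop1, gStep, pvA_loop1Aux_eq]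
    cases h : gS1 0 r rest with
    | nil => rfl
    | cons x xs => cases xs with
      | nil => rfl
      | cons y ys => simp [pvA_loop2Aux_eq]

-- closed zip forms of the canonical recursions (match Source B's comprehensions)
theorem gS1_zip {α : Type} (d : α) (l : List (List α)) (hl : l ≠ []) (r : List α) :
    gS1 d r l = ((l.headD []).headD d :: r) ::
      (List.zipWith (fun cur nxt => nxt.headD d :: cur.tail) l.dropLast l.tail
        ++ [(l.getLastD []).tail]) := by
  induction l generalizing r with
  | nil => exact absurd rfl hl
  | cons s rest ih =>
    cases rest with
    | nil => rfl
    | cons t rest' =>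
      show (s.headD d :: r) :: gS1 d s.tail (t :: rest') = _
      rw [ih (by simp) s.tail]
      simp

theorem gS2_zip {α : Type} (d : α) (l : List (List α)) (hl : l ≠ []) (p : List α) :
    gS2 d (p.getLastD d) l =
      List.zipWith (fun prv cur => cur.dropLast ++ [prv.getLastD d]) (p :: l.dropLast) l.dropLast
        ++ [l.getLastD [] ++ [((p :: l).dropLast.getLastD []).getLastD d]] := by
  induction l generalizing p with
  | nil => exact absurd rfl hl
  | cons s rest ih =>
    cases rest with
    | nil => rfl
    | cons t rest' =>
      show (s.dropLast ++ [p.getLastD d]) :: gS2 d (s.getLastD d) (t :: rest') = _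
      rw [ih (by simp) s]
      simp


theorem slice_one_neg_one {α : Type} (xs : List α) :
    PySem.List.slice xs (some 1) (some (-1)) = xs.tail.dropLast := by
  cases xs with
  | nil => simp [PySem.List.slice, PySem.List.clampIdx]
  | cons x l =>
    simp only [PySem.List.slice, PySem.List.clampIdx, List.dropLast_eq_take]
    norm_num
    rw [if_neg (by exact not_lt.mpr (Int.natCast_nonneg _))]
    omega

theorem slice_two_none {α : Type} (xs : List α) :
    PySem.List.slice xs (some 2) none = xs.tail.tail := by
  rw [PySem.List.slice_from _ (by norm_num)]
  cases xs with
  | nil => rfl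
  | cons x l => cases l <;> simp

theorem pyGetD_one {α : Type} (xs : List (List α)) : PySem.List.pyGetD xs 1 [] = xs.tail.headD [] := by
  rw [PySem.List.pyGetD_ofNat']
  cases xs with
  | nil => rfl
  | cons x l => cases l <;> simp

theorem pyGetD_zero' {α : Type} (xs : List α) (d : α) :
    PySem.List.pyGetD xs 0 d = xs.headD d := by
  rw [PySem.List.pyGetD_zero]
  cases xs <;> simp

theorem pyGetD_neg_one' {α : Type} (xs : List α) (d : α) :
    PySem.List.pyGetD xs (-1) d = xs.getLastD d := by
  unfold PySem.List.pyGetD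
  rw [PySem.List.pyGet?_neg_one]
  cases h : xs.getLast? with
  | none => cases xs with
    | nil => rfl
    | cons a l => simp at h
  | some y => simp [List.getLastD_eq_getLast?, h]

theorem pyGetD_len_sub_one {α : Type} (xs : List α) (d : α) (hx : xs ≠ []) :
    PySem.List.pyGetD xs ((xs.length : Int) - 1) d = xs.getLastD d := by
  have h1 : (0:Int) ≤ (xs.length : Int) - 1 := by
    have := List.length_pos_iff.mpr hx; omega
  unfold PySem.List.pyGetD
  rw [PySem.List.pyGet?_of_nonneg xs h1,
    show ((xs.length : Int) - 1).toNat = xs.length - 1 from by omega,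
    List.getLastD_eq_getLast?, List.getLast?_eq_getElem?]

theorem pyGetD_len_sub_two {α : Type} (xs : List α) (d : α) (hx : 2 ≤ xs.length) :
    PySem.List.pyGetD xs ((xs.length : Int) - 2) d = xs.dropLast.getLastD d := by
  unfold PySem.List.pyGetD
  rw [PySem.List.pyGet?_of_nonneg xs (by omega),
    show ((xs.length : Int) - 2).toNat = xs.length - 2 from by omega,
    List.getLastD_eq_getLast?, List.getLast?_eq_getElem?,
    show xs.dropLast.length - 1 = xs.length - 2 from by simp; omega,
    List.getElem?_eq_getElem (by omega), List.getElem?_eq_getElem (by simp; omega)]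
  simp only [Option.getD_some, List.getElem_dropLast]

theorem pvB_step_eq (m : List (List (Int × Int))) : pvB_step m = gStep pvB_d m := by
  match m with
  | [] => rfl
  | [r] => simp [pvB_step, gStep, gS1]
  | r :: s :: rest =>
    have hlen : ¬ ((r :: s :: rest).length < 2) := by simp
    simp only [pvB_step, if_neg hlen]
    rw [pyGetD_one, slice_one_neg_one, slice_two_none]
    have hznil : (s :: rest) ≠ [] := by simp
    -- the intermediate list `a` is gS1's output
    have ha : [PySem.List.pyGetD ((r :: s :: rest).tail.headD []) 0 pvB_d :: PySem.List.pyGetD (r :: s :: rest) 0 []]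
        ++ List.zipWith (fun cur nxt => PySem.List.pyGetD nxt 0 pvB_d :: cur.tail)
             (r :: s :: rest).tail.dropLast (r :: s :: rest).tail.tail
        ++ [(PySem.List.pyGetD (r :: s :: rest) (((r :: s :: rest).length : Int) - 1) []).tail]
        = gS1 pvB_d r (s :: rest) := by
      rw [gS1_zip pvB_d (s :: rest) hznil r, pyGetD_len_sub_one _ _ (by simp)]
      simp [pyGetD_zero']
    rw [ha]
    have hlen1 : (gS1 pvB_d r (s :: rest)).length = rest.length + 2 := by
      clear ha
      induction rest generalizing r s with
      | nil => rfl
      | cons t rest' ih => simpa [gS1] using ih s.tail t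
    match hg : gS1 pvB_d r (s :: rest) with
    | [] => rw [hg] at hlen1; simp at hlen1
    | [a0] => rw [hg] at hlen1; simp at hlen1
    | a0 :: a1 :: arest =>
      have hL : (((r :: s :: rest).length : Int)) = (((a0 :: a1 :: arest).length : Int)) := by
        rw [← hg]; rw [hlen1]; simp; ring
      rw [hL, PySem.List.slice_to_neg_one, slice_one_neg_one, pyGetD_zero',
        pyGetD_len_sub_one _ _ (by simp),
        pyGetD_len_sub_two _ _ (by simp)]
      rw [show gStep pvB_d (r :: s :: rest) =
            a0.dropLast :: gS2 pvB_d (a0.getLastD pvB_d) (a1 :: arest) from by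
              simp only [gStep, hg],
          gS2_zip pvB_d (a1 :: arest) (by simp) a0]
      simp [pyGetD_neg_one']
-- naturality: the step commutes with an elementwise map (defaults unused on nonempty rows)
theorem headD_map {α β : Type} (f : α → β) (s : List α) (hs : s ≠ []) (d : α) (d' : β) :
    (s.map f).headD d' = f (s.headD d) := by cases s with
  | nil => exact absurd rfl hs
  | cons a l => rfl

theorem getLastD_map {α β : Type} (f : α → β) (s : List α) (hs : s ≠ []) (d : α) (d' : β) :
    (s.map f).getLastD d' = f (s.getLastD d) := by
  rw [List.getLastD_eq_getLast?, List.getLastD_eq_getLast?, List.getLast?_map]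
  cases h : s.getLast? with
  | none => exact absurd (List.getLast?_eq_none_iff.mp h) hs
  | some y => simp

theorem gS1_natural {α β : Type} (d : α) (d' : β) (f : α → β) (l : List (List α))
    (hl : ∀ s ∈ l, s ≠ []) (r : List α) :
    gS1 d' (r.map f) (l.map (List.map f)) = (gS1 d r l).map (List.map f) := by
  induction l generalizing r with
  | nil => rfl
  | cons s rest ih =>
    have hs : s ≠ [] := hl s (by simp)
    simp only [List.map_cons, gS1]
    rw [headD_map f s hs d d', ← List.map_tail, ih (fun x hx => hl x (by simp [hx])) s.tail]

theorem gS2_natural {α β : Type} (d : α) (d' : β) (f : α → β) (l : List (List α))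
    (hl : ∀ s ∈ l.dropLast, s ≠ []) (c : α) :
    gS2 d' (f c) (l.map (List.map f)) = (gS2 d c l).map (List.map f) := by
  induction l generalizing c with
  | nil => rfl
  | cons s rest ih =>
    cases rest with
    | nil => simp [gS2]
    | cons t rest' =>
      have hs : s ≠ [] := hl s (by simp)
      simp only [List.map_cons, gS2]
      rw [getLastD_map f s hs d d',
        show List.map f t :: List.map (List.map f) rest' = List.map (List.map f) (t :: rest') from rfl,
        ih (by intro x hx; exact hl x (by simp [hx])) (s.getLastD d)]
      simp

-- rows produced by gS1: all but the last are nonempty, and there is at least one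
theorem gS1_ne_nil {α : Type} (d : α) (r : List α) (l : List (List α)) : gS1 d r l ≠ [] := by
  cases l <;> simp [gS1]

theorem gS1_dropLast_ne_nil {α : Type} (d : α) (l : List (List α)) (r : List α) :
    ∀ s ∈ (gS1 d r l).dropLast, s ≠ [] := by
  induction l generalizing r with
  | nil => simp [gS1]
  | cons s rest ih =>
    simp only [gS1, List.dropLast_cons_of_ne_nil (gS1_ne_nil d s.tail rest)]
    intro x hx
    rcases List.mem_cons.mp hx with h | h
    · subst h; simp
    · exact ih s.tail x h

theorem gStep_natural {α β : Type} (d : α) (d' : β) (f : α → β) (m : List (List α))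
    (hm : ∀ s ∈ m.tail, s ≠ []) :
    gStep d' (m.map (List.map f)) = (gStep d m).map (List.map f) := by
  cases m with
  | nil => rfl
  | cons r rest =>
    simp only [List.map_cons, gStep]
    rw [gS1_natural d d' f rest (by simpa using hm) r]
    cases hg : gS1 d r rest with
    | nil => rfl
    | cons a0 arest =>
      cases arest with
      | nil => rfl
      | cons a1 arest' =>
        have h0 : a0 ≠ [] := by
          have := gS1_dropLast_ne_nil d rest r
          rw [hg, List.dropLast_cons_of_ne_nil (by simp)] at this
          exact this a0 (by simp)
        simp only [List.map_cons]
        rw [getLastD_map f a0 h0 d d',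
          show List.map f a1 :: List.map (List.map f) arest' = List.map (List.map f) (a1 :: arest') from rfl,
          gS2_natural d d' f (a1 :: arest') ?hrows (a0.getLastD d)]
        · simp
        · have := gS1_dropLast_ne_nil d rest r
          rw [hg, List.dropLast_cons_of_ne_nil (by simp)] at this
          intro x hx; exact this x (by simp [hx])
-- the step preserves the shape (row lengths) of a matrix with nonempty rows
theorem gS1_lengths {α : Type} (d : α) (l : List (List α)) (hl : ∀ s ∈ l, s ≠ [])
    (hne : l ≠ []) (r : List α) :
    (gS1 d r l).map List.length =
      (r.length + 1) :: (l.dropLast.map List.length ++ [(l.getLastD []).length - 1]) := by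
  induction l generalizing r with
  | nil => exact absurd rfl hne
  | cons s rest ih =>
    cases rest with
    | nil => simp [gS1]
    | cons t rest' =>
      have hs : s ≠ [] := hl s (by simp)
      have hpos : 0 < s.length := List.length_pos_iff.mpr hs
      rw [show gS1 d r (s :: t :: rest') = (s.headD d :: r) :: gS1 d s.tail (t :: rest') from rfl,
        List.map_cons, ih (fun x hx => hl x (by simp [hx])) (by simp) s.tail]
      simp
      omega

theorem gS2_lengths {α : Type} (d : α) (l : List (List α))
    (hl : ∀ s ∈ l.dropLast, s ≠ []) (hne : l ≠ []) (c : α) :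
    (gS2 d c l).map List.length =
      l.dropLast.map List.length ++ [(l.getLastD []).length + 1] := by
  induction l generalizing c with
  | nil => exact absurd rfl hne
  | cons s rest ih =>
    cases rest with
    | nil => simp [gS2]
    | cons t rest' =>
      have hs : s ≠ [] := hl s (by simp)
      have hpos : 0 < s.length := List.length_pos_iff.mpr hs
      rw [show gS2 d c (s :: t :: rest') = (s.dropLast ++ [c]) :: gS2 d (s.getLastD d) (t :: rest') from rfl,
        List.map_cons, ih (fun x hx => hl x (by simp; exact Or.inr hx)) (by simp) (s.getLastD d)]
      simp
      omega

theorem gStep_lengths {α : Type} (d : α) (m : List (List α)) (hm : ∀ s ∈ m, s ≠ []) :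
    (gStep d m).map List.length = m.map List.length := by
  cases m with
  | nil => rfl
  | cons r rest =>
    cases rest with
    | nil => simp [gStep, gS1]
    | cons s rest' =>
      have h1 := gS1_lengths d (s :: rest') (fun x hx => hm x (by simp [hx])) (by simp) r
      cases hg : gS1 d r (s :: rest') with
      | nil => exact absurd hg (gS1_ne_nil d r (s :: rest'))
      | cons a0 arest =>
        cases arest with
        | nil =>
          rw [hg] at h1
          have := congrArg List.length h1
          simp at this
        | cons a1 arest' =>
          have hdrop := gS1_dropLast_ne_nil d (s :: rest') r
          rw [hg, List.dropLast_cons_of_ne_nil (by simp)] at hdrop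
          simp only [gStep, hg]
          have h2 := gS2_lengths d (a1 :: arest')
            (fun x hx => hdrop x (by simp [hx])) (by simp) (a0.getLastD d)
          rw [hg] at h1
          simp only [List.map_cons] at h1 ⊢
          have ha0 : a0.length = r.length + 1 := by
            have := congrArg (fun x => x.headD 0) h1; simpa using this
          have htl : (a1 :: arest').map List.length =
              (s :: rest').dropLast.map List.length ++ [((s :: rest').getLastD []).length - 1] := by
            have := congrArg List.tail h1; simpa using this
          rw [h2]
          have hlast : ((s :: rest').getLastD []).length ≥ 1 := by
            have := hm ((s :: rest').getLastD []) ?_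
            · cases h : (s :: rest').getLastD [] with
              | nil => exact absurd h this
              | cons y ys => simp
            · rw [List.getLastD_eq_getLast?, List.getLast?_eq_some_getLast (l := s :: rest') (by simp)]
              simp [List.getLast_mem]
          have hdl : List.map List.length (a1 :: arest').dropLast = List.map List.length (s :: rest').dropLast := by
            have h4 := congrArg List.dropLast htl
            simpa [List.dropLast_concat] using h4
          have hlst : ((a1 :: arest').getLastD []).length = ((s :: rest').getLastD []).length - 1 := by
            have h3 := congrArg (fun (x : List Nat) => x.getLastD 0) htl
            simp only at h3
            rw [getLastD_map List.length (a1 :: arest') (by simp) [] 0, List.getLastD_concat] at h3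
            exact h3
          rw [hdl, hlst,
            show ((s :: rest').getLastD []).length - 1 + 1 = ((s :: rest').getLastD []).length from by omega]
          have hsplit : List.map List.length (s :: rest').dropLast ++ [((s :: rest').getLastD []).length] =
              List.map List.length (s :: rest') := by
            conv_rhs => rw [← List.dropLast_concat_getLast (l := s :: rest') (by simp)]
            rw [List.map_append]
            simp [List.getLastD_eq_getLast?, List.getLast?_eq_some_getLast (l := s :: rest') (by simp)]
          rw [hsplit]
          simp only [List.map_cons, List.cons.injEq]
          exact ⟨by simp [ha0], trivial⟩
-- every element of the stepped matrix is an element of the original (nonempty rows)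
theorem headD_mem {α : Type} (s : List α) (hs : s ≠ []) (d : α) : s.headD d ∈ s := by
  cases s with
  | nil => exact absurd rfl hs
  | cons a l => simp

theorem getLastD_mem {α : Type} (s : List α) (hs : s ≠ []) (d : α) : s.getLastD d ∈ s := by
  rw [List.getLastD_eq_getLast?, List.getLast?_eq_some_getLast hs]
  simp [List.getLast_mem]

theorem gS1_mem {α : Type} (d : α) (l : List (List α)) (hl : ∀ s ∈ l, s ≠ []) (r r' : List α)
    (hr : r' ∈ gS1 d r l) (x : α) (hx : x ∈ r') : x ∈ r ∨ ∃ s ∈ l, x ∈ s := by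
  induction l generalizing r with
  | nil => simp [gS1] at hr; subst hr; exact Or.inl hx
  | cons s rest ih =>
    simp only [gS1, List.mem_cons] at hr
    rcases hr with h | h
    · subst h
      rcases List.mem_cons.mp hx with h | h
      · subst h; exact Or.inr ⟨s, by simp, headD_mem s (hl s (by simp)) d⟩
      · exact Or.inl h
    · rcases ih (fun y hy => hl y (by simp [hy])) s.tail h with h2 | ⟨t, ht, hxt⟩
      · exact Or.inr ⟨s, by simp, List.mem_of_mem_tail h2⟩
      · exact Or.inr ⟨t, by simp [ht], hxt⟩

theorem gS2_mem {α : Type} (d : α) (l : List (List α)) (hl : ∀ s ∈ l.dropLast, s ≠ [])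
    (c : α) (r' : List α)
    (hr : r' ∈ gS2 d c l) (x : α) (hx : x ∈ r') : x = c ∨ ∃ s ∈ l, x ∈ s := by
  induction l generalizing c with
  | nil => simp [gS2] at hr
  | cons s rest ih =>
    cases rest with
    | nil =>
      simp only [gS2, List.mem_singleton] at hr
      subst hr
      rcases List.mem_append.mp hx with h | h
      · exact Or.inr ⟨s, by simp, h⟩
      · simp at h; exact Or.inl h
    | cons t rest' =>
      simp only [gS2, List.mem_cons] at hr
      rcases hr with h | h
      · subst h
        rcases List.mem_append.mp hx with h | h
        · exact Or.inr ⟨s, by simp, List.dropLast_subset _ h⟩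
        · simp at h; exact Or.inl h
      · have hs : s ≠ [] := hl s (by simp)
        rcases ih (fun u hu => hl u (by simp; exact Or.inr hu)) (s.getLastD d) h with h2 | ⟨u, hu, hxu⟩
        · exact Or.inr ⟨s, by simp, h2 ▸ getLastD_mem s hs d⟩
        · exact Or.inr ⟨u, by simp [hu], hxu⟩

theorem gStep_mem {α : Type} (d : α) (m : List (List α)) (hm : ∀ s ∈ m, s ≠ [])
    (r' : List α) (hr : r' ∈ gStep d m) (x : α) (hx : x ∈ r') : ∃ s ∈ m, x ∈ s := by
  cases m with
  | nil => simp [gStep] at hr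
  | cons r rest =>
    simp only [gStep] at hr
    cases hg : gS1 d r rest with
    | nil => exact absurd hg (gS1_ne_nil d r rest)
    | cons a0 arest =>
      rw [hg] at hr
      have ha0 : ∀ y ∈ a0, y ∈ r ∨ ∃ s ∈ rest, y ∈ s := by
        intro y hy
        exact gS1_mem d rest (fun u hu => hm u (by simp [hu])) r a0 (hg ▸ by simp) y hy
      have harest : ∀ u ∈ arest, ∀ y ∈ u, y ∈ r ∨ ∃ s ∈ rest, y ∈ s := by
        intro u hu y hy
        exact gS1_mem d rest (fun v hv => hm v (by simp [hv])) r u (hg ▸ by simp [hu]) y hy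
      cases arest with
      | nil =>
        simp at hr; subst hr
        rcases ha0 x hx with h | ⟨u,hu,hxu⟩
        · exact ⟨r, by simp, h⟩
        · exact ⟨u, by simp [hu], hxu⟩
      | cons a1 arest' =>
        rcases List.mem_cons.mp hr with h | h
        · subst h
          rcases ha0 x (List.dropLast_subset _ hx) with h | ⟨u,hu,hxu⟩
          · exact ⟨r, by simp, h⟩
          · exact ⟨u, by simp [hu], hxu⟩
        · have hdrop := gS1_dropLast_ne_nil d rest r
          rw [hg, List.dropLast_cons_of_ne_nil (by simp)] at hdrop
          rcases gS2_mem d (a1 :: arest') (fun u hu => hdrop u (by simp [hu]))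
              (a0.getLastD d) r' h x hx with h2 | ⟨u, hu, hxu⟩
          · have h0 : a0 ≠ [] := hdrop a0 (by simp)
            rcases ha0 (a0.getLastD d) (getLastD_mem a0 h0 d) with h3 | ⟨u,hu,hxu⟩
            · exact ⟨r, by simp, h2 ▸ h3⟩
            · exact ⟨u, by simp [hu], h2 ▸ hxu⟩
          · rcases harest u (by simp [hu]) x hxu with h3 | ⟨v,hv,hxv⟩
            · exact ⟨r, by simp, h3⟩
            · exact ⟨v, by simp [hv], hxv⟩
-- positions, lookups and gathers ----------------------------------------------------
def pvLk {β : Type} (d : β) (x : List (List β)) (p : Int × Int) : β :=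
  PySem.List.pyGetD (PySem.List.pyGetD x p.1 []) p.2 d

def pvGath {β : Type} (d : β) (x : List (List β)) (s : List (List (Int × Int))) :
    List (List β) :=
  s.map (fun row => row.map (pvLk d x))

theorem pvB_gatherP_eq (x s : List (List (Int × Int))) : pvB_gatherP x s = pvGath pvB_d x s := rfl
theorem pvB_gatherI_eq (g : List (List Int)) (s : List (List (Int × Int))) :
    pvB_gatherI g s = pvGath 0 g s := rfl

def pvValid (sh : List Nat) (p : Int × Int) : Prop :=
  ∃ (r c : Nat), p = ((r : Int), (c : Int)) ∧ r < sh.length ∧ c < sh.getD r 0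

def pvGood (sh : List Nat) (S : List (List (Int × Int))) : Prop :=
  S.map List.length = sh ∧ ∀ row ∈ S, ∀ p ∈ row, pvValid sh p

theorem gath_shape {β : Type} (d : β) (x : List (List β)) (s : List (List (Int × Int))) :
    (pvGath d x s).map List.length = s.map List.length := by
  simp [pvGath]

theorem getD_map_of_lt {β γ : Type} (f : β → γ) (l : List β) (r : Nat) (hr : r < l.length)
    (d : β) (d' : γ) : (l.map f).getD r d' = f (l.getD r d) := by
  rw [List.getD_eq_getElem _ _ (by simpa using hr), List.getD_eq_getElem _ _ hr]
  simp

theorem pvLk_natCast {β : Type} (d : β) (x : List (List β)) (r c : Nat) :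
    pvLk d x ((r : Int), (c : Int)) = (x.getD r []).getD c d := by
  simp [pvLk]

-- the entry of a gather at a valid position
theorem gath_entry {β : Type} (d : β) (x : List (List β)) (S : List (List (Int × Int)))
    (sh : List Nat) (hS : S.map List.length = sh) (r c : Nat)
    (hr : r < sh.length) (hc : c < sh.getD r 0) (dp : Int × Int) :
    pvLk d (pvGath d x S) ((r : Int), (c : Int)) = pvLk d x ((S.getD r []).getD c dp) := by
  have hrS : r < S.length := by
    have := congrArg List.length hS; simp at this; omega
  have hcS : c < (S.getD r []).length := by
    have := getD_map_of_lt List.length S r hrS [] 0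
    rw [hS] at this; omega
  rw [pvLk_natCast, pvGath, getD_map_of_lt _ S r hrS [] []]
  exact getD_map_of_lt (pvLk d x) (S.getD r []) c hcS dp d

theorem gath_good (sh : List Nat) (S T : List (List (Int × Int)))
    (hS : pvGood sh S) (hT : pvGood sh T) : pvGood sh (pvGath pvB_d S T) := by
  constructor
  · rw [gath_shape, hT.1]
  · intro row hrow p hp
    rcases List.mem_map.mp hrow with ⟨trow, htrow, rfl⟩
    rcases List.mem_map.mp hp with ⟨q, hq, rfl⟩
    rcases hT.2 trow htrow q hq with ⟨r, c, rfl, hr, hc⟩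
    rw [pvLk_natCast]
    have hrS : r < S.length := by
      have := congrArg List.length hS.1; simp at this; omega
    have hcS : c < (S.getD r []).length := by
      have := getD_map_of_lt List.length S r hrS [] 0
      rw [hS.1] at this; omega
    have m1 : S.getD r [] ∈ S := by
      rw [List.getD_eq_getElem _ _ hrS]; exact List.getElem_mem _
    have m2 : (S.getD r []).getD c pvB_d ∈ S.getD r [] := by
      rw [List.getD_eq_getElem _ _ hcS]; exact List.getElem_mem _
    exact hS.2 _ m1 _ m2

theorem gath_assoc {β : Type} (d : β) (x : List (List β)) (sh : List Nat)
    (S T : List (List (Int × Int)))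
    (hS : pvGood sh S) (hT : pvGood sh T) :
    pvGath d x (pvGath pvB_d S T) = pvGath d (pvGath d x S) T := by
  show (pvGath pvB_d S T).map (fun row => row.map (pvLk d x)) = _
  rw [pvGath, List.map_map]
  apply List.map_congr_left
  intro trow htrow
  simp only [Function.comp_apply, List.map_map]
  apply List.map_congr_left
  intro q hq
  rcases hT.2 trow htrow q hq with ⟨r, c, rfl, hr, hc⟩
  simp only [Function.comp_apply]
  rw [gath_entry d x S sh hS.1 r c hr hc pvB_d, pvLk_natCast]
-- the coordinate grid ----------------------------------------------------------------
def pvCoords (m : List (List Int)) : List (List (Int × Int)) :=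
  (PySem.List.enumerate m 0).map
    (fun rr => (PySem.List.pyRange 0 (rr.2.length : Int) 1).map (fun c => (rr.1, c)))

theorem pvB_borderPower_eq (m : List (List Int)) (k : Int) :
    pvB_borderPower m k =
      pvB_gatherI m (pvB_binpow (pvCoords m) (pvB_step (pvCoords m)) k.toNat) := rfl

theorem pvRowsNE_of_shape {α β : Type} (x : List (List α)) (y : List (List β))
    (h : x.map List.length = y.map List.length) (hy : ∀ r ∈ y, r ≠ []) :
    ∀ r ∈ x, r ≠ [] := by
  intro r hr hcon
  subst hcon
  have h0 : (0 : Nat) ∈ y.map List.length := by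
    rw [← h]; exact List.mem_map.mpr ⟨[], hr, rfl⟩
  rcases List.mem_map.mp h0 with ⟨s, hs, hlen⟩
  exact hy s hs (List.length_eq_zero_iff.mp hlen)

theorem pvCoords_shape (m : List (List Int)) :
    (pvCoords m).map List.length = m.map List.length := by
  unfold pvCoords
  rw [List.map_map]
  have : ∀ (s : Int), (PySem.List.enumerate m s).map
      (List.length ∘ fun rr => (PySem.List.pyRange 0 (rr.2.length : Int) 1).map (fun c => (rr.1, c)))
      = m.map List.length := by
    intro s
    induction m generalizing s with
    | nil => simp [PySem.List.enumerate_nil]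
    | cons row rest ih =>
      rw [PySem.List.enumerate_cons]
      simp only [List.map_cons, Function.comp_apply, ih]
      simp [PySem.List.length_pyRange_one]
  exact this 0

theorem pvCoords_congr (x y : List (List Int)) (h : x.map List.length = y.map List.length) :
    pvCoords x = pvCoords y := by
  unfold pvCoords
  have : ∀ (s : Int) (x y : List (List Int)), x.map List.length = y.map List.length →
      (PySem.List.enumerate x s).map
        (fun rr => (PySem.List.pyRange 0 (rr.2.length : Int) 1).map (fun c => (rr.1, c))) =
      (PySem.List.enumerate y s).map
        (fun rr => (PySem.List.pyRange 0 (rr.2.length : Int) 1).map (fun c => (rr.1, c))) := by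
    intro s x y h
    induction x generalizing s y with
    | nil => cases y with
      | nil => rfl
      | cons b bs => simp at h
    | cons a as ih =>
      cases y with
      | nil => simp at h
      | cons b bs =>
        simp only [List.map_cons, List.cons.injEq] at h
        rw [PySem.List.enumerate_cons, PySem.List.enumerate_cons]
        simp only [List.map_cons]
        rw [ih (s + 1) bs h.2]
        congr 2
        simp [h.1]
  exact this 0 x y h

theorem pvCoords_good (m : List (List Int)) : pvGood (m.map List.length) (pvCoords m) := by
  constructor
  · exact pvCoords_shape m
  · have : ∀ (s : Nat) (g : List (List Int)),
        (∀ k, k < g.length → (g.getD k []).length = (m.map List.length).getD (s + k) 0) →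
        s + g.length ≤ m.length →
        ∀ row ∈ (PySem.List.enumerate g (s : Int)).map
          (fun rr => (PySem.List.pyRange 0 (rr.2.length : Int) 1).map (fun c => (rr.1, c))),
        ∀ p ∈ row, pvValid (m.map List.length) p := by
      intro s g
      induction g generalizing s with
      | nil => intro _ _ row hrow; simp [PySem.List.enumerate_nil] at hrow
      | cons a as ih =>
        intro hk hsl row hrow p hp
        rw [PySem.List.enumerate_cons] at hrow
        simp only [List.map_cons, List.mem_cons] at hrow
        rcases hrow with h | h
        · subst h
          rcases List.mem_map.mp hp with ⟨c, hc, rfl⟩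
          rw [PySem.List.mem_pyRange_one] at hc
          refine ⟨s, c.toNat, by rw [Int.toNat_of_nonneg hc.1], by simp at hsl ⊢; omega, ?_⟩
          have h0 := hk 0 (by simp)
          rw [Nat.add_zero] at h0
          have ha : a.length = (m.map List.length).getD s 0 := by simpa using h0
          omega
        · have := ih (s + 1) (fun k hk2 => by
              have := hk (k + 1) (by simpa using Nat.succ_lt_succ hk2)
              simpa [Nat.add_assoc, Nat.add_comm 1 k] using this)
            (by simp at hsl ⊢; omega)
          rw [show ((s : Int) + 1) = ((s + 1 : Nat) : Int) from by push_cast; ring] at h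
          exact this row h p hp
    intro row hrow p hp
    refine this 0 m ?_ (by simp) row ?_ p hp
    · intro k hk
      rw [Nat.zero_add]
      exact (getD_map_of_lt List.length m k hk [] 0).symm
    · unfold pvCoords at hrow
      simpa using hrow

theorem pvCoords_id (g : List (List Int)) : pvGath 0 g (pvCoords g) = g := by
  unfold pvGath pvCoords
  rw [List.map_map]
  have : ∀ (s : Nat) (x : List (List Int)),
      (∀ k, k < x.length → g.getD (s + k) [] = x.getD k []) →
      (PySem.List.enumerate x (s : Int)).map
        ((fun row => row.map (pvLk 0 g)) ∘
          (fun rr => (PySem.List.pyRange 0 (rr.2.length : Int) 1).map (fun c => (rr.1, c)))) = x := by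
    intro s x
    induction x generalizing s with
    | nil => simp [PySem.List.enumerate_nil]
    | cons a as ih =>
      intro hk
      rw [PySem.List.enumerate_cons]
      simp only [List.map_cons, Function.comp_apply, List.map_map]
      have hrow : (PySem.List.pyRange 0 (a.length : Int) 1).map
          ((pvLk 0 g) ∘ (fun c => ((s : Int), c))) = a := by
        have h0 := hk 0 (by simp)
        simp at h0
        have : ((pvLk 0 g) ∘ (fun c => ((s : Int), c)))
            = fun c => PySem.List.pyGetD a c 0 := by
          funext c
          simp [pvLk, Function.comp, PySem.List.pyGetD_natCast, h0]
        rw [this]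
        exact PySem.List.map_pyGetD_pyRange_zero a 0
      rw [hrow, show ((s : Int) + 1) = ((s + 1 : Nat) : Int) from by push_cast; ring,
        ih (s + 1) (fun k hk2 => by
          have := hk (k + 1) (by simpa using Nat.succ_lt_succ hk2)
          simpa [Nat.add_assoc, Nat.add_comm 1 k] using this)]
  exact this 0 g (fun k hk => by simp)
-- one B-step on a source map, gathered, is one A-step on the gathered grid
theorem step_gath (x : List (List Int)) (S : List (List (Int × Int)))
    (hne : ∀ r ∈ S, r ≠ []) :
    pvGath 0 x (pvB_step S) = pvA_step (pvGath 0 x S) := by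
  calc pvGath 0 x (pvB_step S)
      = (gStep pvB_d S).map (List.map (pvLk 0 x)) := by rw [pvB_step_eq]; rfl
    _ = gStep 0 (S.map (List.map (pvLk 0 x))) :=
        (gStep_natural pvB_d (0 : Int) (pvLk 0 x) S
          (fun s hs => hne s (List.mem_of_mem_tail hs))).symm
    _ = pvA_step (pvGath 0 x S) := by rw [pvA_step_eq]; rfl

theorem rows_ne_of_good (sh : List Nat) (S : List (List (Int × Int)))
    (hS : pvGood sh S) (hsh : ∀ n ∈ sh, n ≠ 0) : ∀ r ∈ S, r ≠ [] := by
  intro r hr hcon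
  subst hcon
  have : (0 : Nat) ∈ sh := by
    rw [← hS.1]; exact List.mem_map.mpr ⟨[], hr, rfl⟩
  exact hsh 0 this rfl

theorem step_good (sh : List Nat) (S : List (List (Int × Int)))
    (hS : pvGood sh S) (hsh : ∀ n ∈ sh, n ≠ 0) : pvGood sh (pvB_step S) := by
  have hne := rows_ne_of_good sh S hS hsh
  constructor
  · rw [pvB_step_eq, gStep_lengths pvB_d S hne, hS.1]
  · intro row hrow p hp
    rw [pvB_step_eq] at hrow
    rcases gStep_mem pvB_d S hne row hrow p hp with ⟨u, hu, hpu⟩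
    exact hS.2 u hu p hpu

theorem binpow_sem (sh : List Nat) : ∀ (fuel k : Nat) (src sq : List (List (Int × Int))),
    k ≤ fuel → pvGood sh src → pvGood sh sq → ∀ (g : List (List Int)),
    pvGath 0 g (pvB_binpowAux fuel src sq k) =
      (fun x => pvGath 0 x sq)^[k] (pvGath 0 g src) := by
  intro fuel
  induction fuel with
  | zero =>
    intro k src sq hk _ _ g
    have : k = 0 := by omega
    subst this
    rfl
  | succ fuel ih =>
    intro k src sq hk hsrc hsq g
    by_cases h0 : k = 0
    · subst h0; rfl
    · rw [show pvB_binpowAux (fuel + 1) src sq k =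
          pvB_binpowAux fuel (if k % 2 = 1 then pvB_gatherP src sq else src)
            (pvB_gatherP sq sq) (k / 2) from by
        simp [pvB_binpowAux, h0]]
      rw [ih (k / 2) _ _ (by omega)
        (by by_cases hodd : k % 2 = 1
            · rw [if_pos hodd, pvB_gatherP_eq]; exact gath_good sh src sq hsrc hsq
            · rw [if_neg hodd]; exact hsrc)
        (by rw [pvB_gatherP_eq]; exact gath_good sh sq sq hsq hsq) g]
      have hTT : (fun x => pvGath 0 x (pvB_gatherP sq sq)) =
          (fun x : List (List Int) => pvGath 0 x sq) ∘ (fun x => pvGath 0 x sq) := by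
        funext x
        rw [pvB_gatherP_eq]
        exact gath_assoc 0 x sh sq sq hsq hsq
      rw [hTT]
      have hsrc' : pvGath 0 g (if k % 2 = 1 then pvB_gatherP src sq else src) =
          (fun x : List (List Int) => pvGath 0 x sq)^[k % 2] (pvGath 0 g src) := by
        by_cases hodd : k % 2 = 1
        · rw [if_pos hodd, hodd, pvB_gatherP_eq]
          exact gath_assoc 0 g sh src sq hsrc hsq
        · rw [if_neg hodd, show k % 2 = 0 from by omega]
          rfl
      rw [hsrc',
        show ((fun x : List (List Int) => pvGath 0 x sq) ∘ fun x => pvGath 0 x sq) =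
            (fun x : List (List Int) => pvGath 0 x sq)^[2] from by
          funext z
          show _ = (fun x : List (List Int) => pvGath 0 x sq)^[2] z
          rw [Function.iterate_succ_apply', Function.iterate_one]
          rfl,
        ← Function.iterate_mul, ← Function.iterate_add_apply,
        show 2 * (k / 2) + k % 2 = k from by omega]

theorem power_eq (g : List (List Int)) (hne : ∀ r ∈ g, r ≠ []) (k : Nat) :
    pvB_gatherI g (pvB_binpow (pvCoords g) (pvB_step (pvCoords g)) k) = pvA_step^[k] g := by
  have hsh0 : ∀ n ∈ g.map List.length, n ≠ 0 := by
    intro n hn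
    rcases List.mem_map.mp hn with ⟨r, hr, rfl⟩
    simpa using (hne r hr)
  have hgc := pvCoords_good g
  have hS1 : pvGood (g.map List.length) (pvB_step (pvCoords g)) :=
    step_good _ _ hgc hsh0
  rw [pvB_gatherI_eq, pvB_binpow,
    binpow_sem (g.map List.length) k k _ _ le_rfl hgc hS1 g, pvCoords_id]
  have key : ∀ (x : List (List Int)), x.map List.length = g.map List.length →
      pvGath 0 x (pvB_step (pvCoords g)) = pvA_step x := by
    intro x hx
    have hxne : ∀ r ∈ x, r ≠ [] := pvRowsNE_of_shape x g hx hne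
    rw [pvCoords_congr g x hx.symm,
      step_gath x (pvCoords x)
        (pvRowsNE_of_shape _ x (pvCoords_shape x) hxne),
      pvCoords_id]
  have shp : ∀ n : Nat, (pvA_step^[n] g).map List.length = g.map List.length := by
    intro n
    induction n with
    | zero => rfl
    | succ n ihn =>
      rw [Function.iterate_succ_apply', pvA_step_eq,
        gStep_lengths 0 _ (pvRowsNE_of_shape _ g ihn hne), ihn]
  induction k with
  | zero => rfl
  | succ n ihn =>
    rw [Function.iterate_succ_apply', Function.iterate_succ_apply', ihn, key _ (shp n)]

-- shape preservation of iterated steps -----------------------------------------------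
theorem stepIter_shape (g : List (List Int)) (hne : ∀ r ∈ g, r ≠ []) (k : Nat) :
    (pvA_step^[k] g).map List.length = g.map List.length := by
  induction k with
  | zero => rfl
  | succ n ihn =>
    rw [Function.iterate_succ_apply', pvA_step_eq,
      gStep_lengths 0 _ (pvRowsNE_of_shape _ g ihn hne), ihn]

theorem pvMod_nonneg (a b : Int) (hb : 0 < b) : 0 ≤ PySem.Int.mod a b := by
  rw [PySem.Int.mod_eq_emod_of_pos hb]
  exact Int.emod_nonneg _ (by omega)

theorem pvMod_lt (a b : Int) (hb : 0 < b) : PySem.Int.mod a b < b := by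
  rw [PySem.Int.mod_eq_emod_of_pos hb]
  exact Int.emod_lt_of_pos _ hb

-- per-application equalities ---------------------------------------------------------
theorem roB_eq (i j : Int) (hij : 0 < i * j) (q : List (List Int))
    (hq : ∀ r ∈ q, r ≠ []) (n : Int) :
    pvB_borderPower q (PySem.Int.mod n (i * j)) = pvA_ro i j n q := by
  rw [pvB_borderPower_eq, power_eq q hq]
  unfold pvA_ro
  rw [if_neg (by omega)]

theorem shB_eq (q : List (List Int)) (hq : q ≠ []) (n : Int) :
    PySem.List.slice q (some ((q.length : Int) - PySem.Int.mod n (q.length : Int))) none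
      ++ PySem.List.slice q none (some ((q.length : Int) - PySem.Int.mod n (q.length : Int)))
      = pvA_sh n q := by
  have hL : 0 < q.length := List.length_pos_iff.mpr hq
  have hLI : (0 : Int) < (q.length : Int) := by exact_mod_cast hL
  have h0 := pvMod_nonneg n _ hLI
  have h1 := pvMod_lt n _ hLI
  unfold pvA_sh
  rw [if_neg (by omega)]
  rw [PySem.List.slice_from _ (by omega), PySem.List.slice_to _ (by omega)]
  have : ((q.length : Int) - PySem.Int.mod n (q.length : Int)).toNat
      = q.length - (PySem.Int.mod n (q.length : Int)).toNat := by omega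
  rw [this]

-- the run-counting folds of A and B agree given pointwise-equal, invariant-preserving ops
theorem fold_congr (f g : Int → List (List Int) → List (List Int))
    (P : List (List Int) → Prop) (temp : String)
    (hfg : ∀ n q, P q → f n q = g n q) (hP : ∀ n q, P q → P (f n q)) :
    ∀ (rest : List String) (cnt : Int) (q : List (List Int)), P q →
    f (rest.foldl (fun (st : Int × List (List Int)) o =>
         if temp == o then (st.1 + 1, st.2) else (st.1, f st.1 st.2)) (cnt, q)).1
      (rest.foldl (fun (st : Int × List (List Int)) o =>
         if temp == o then (st.1 + 1, st.2) else (st.1, f st.1 st.2)) (cnt, q)).2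
    = g (rest.foldl (fun (st : Int × List (List Int)) o =>
         if o == temp then (st.1 + 1, st.2) else (st.1, g st.1 st.2)) (cnt, q)).1
      (rest.foldl (fun (st : Int × List (List Int)) o =>
         if o == temp then (st.1 + 1, st.2) else (st.1, g st.1 st.2)) (cnt, q)).2 := by
  intro rest
  induction rest with
  | nil => intro cnt q hq; exact hfg cnt q hq
  | cons o rest ih =>
    intro cnt q hq
    by_cases h : temp = o
    · have h1 : (temp == o) = true := by simp [h]
      have h2 : (o == temp) = true := by simp [h]
      simp only [List.foldl_cons, h1, h2, if_true]
      exact ih (cnt + 1) q hq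
    · have h1 : (temp == o) = false := by simp [h]
      have h2 : (o == temp) = false := by
        simp only [beq_eq_false_iff_ne, ne_eq]
        exact fun hc => h hc.symm
      simp only [List.foldl_cons, h1, h2, Bool.false_eq_true, if_false]
      rw [← hfg cnt q hq]
      exact ih cnt (f cnt q) (hP cnt q hq)

-- ===== VERDICT (by name: the statement is the Claim_ definition above) =====
theorem solution_spec : Claim_equal_solution := by
  intro rc oper hdom hpre
  obtain ⟨h1, h2, h3, h4⟩ := hpre
  unfold Spec_solution solution solution_alt
  simp only
  have hrcpos : 0 < rc.length := List.length_pos_iff.mpr h1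
  by_cases hR : PySem.Str.pyGet? (oper.headD "") 0 = some 'R'
  · -- rotate branch: pvA_apply = ro, pvB_apply = border power; shape is the invariant
    have hne : ∀ r ∈ rc, r ≠ [] := h4 hR
    have hhead : rc.headD [] ≠ [] := by
      cases rc with
      | nil => exact absurd rfl h1
      | cons a as => exact hne a (by simp)
    have hj : 0 < (rc.headD []).length := List.length_pos_iff.mpr hhead
    have hij : 0 < (rc.length : Int) * ((rc.headD []).length : Int) := by
      have hi' : (0:Int) < (rc.length : Int) := by exact_mod_cast hrcpos
      have hj' : (0:Int) < ((rc.headD []).length : Int) := by exact_mod_cast hj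
      positivity
    refine fold_congr (pvA_apply (rc.length : Int) ((rc.headD []).length : Int) (oper.headD ""))
      (pvB_apply (rc.length : Int) ((rc.headD []).length : Int) (oper.headD ""))
      (fun q => q.map List.length = rc.map List.length) (oper.headD "") ?_ ?_ oper.tail 1 rc rfl
    · intro n q hqsh
      have hqne : ∀ r ∈ q, r ≠ [] := pvRowsNE_of_shape q rc hqsh hne
      unfold pvA_apply pvB_apply
      rw [if_pos hR, if_pos hR, roB_eq _ _ hij q hqne n]
    · intro n q hqsh
      have hqne : ∀ r ∈ q, r ≠ [] := pvRowsNE_of_shape q rc hqsh hne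
      unfold pvA_apply
      rw [if_pos hR]
      unfold pvA_ro
      rw [if_neg (by omega), stepIter_shape q hqne, hqsh]
  · -- shift branch: pvA_apply = sh, pvB_apply = slice rotation; row count is the invariant
    refine fold_congr (pvA_apply (rc.length : Int) ((rc.headD []).length : Int) (oper.headD ""))
      (pvB_apply (rc.length : Int) ((rc.headD []).length : Int) (oper.headD ""))
      (fun q => q.length = rc.length) (oper.headD "") ?_ ?_ oper.tail 1 rc rfl
    · intro n q hql
      have hqne : q ≠ [] := by
        intro hc; subst hc; simp at hql; omega
      unfold pvA_apply pvB_apply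
      rw [if_neg hR, if_neg hR]
      simp only
      rw [← hql]
      exact (shB_eq q hqne n).symm
    · intro n q hql
      unfold pvA_apply
      rw [if_neg hR]
      unfold pvA_sh
      split_ifs with h0
      · exact hql
      · simp only [List.length_append, List.length_drop, List.length_take]
        omega
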